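-- pv_equiv track=rewrite | github.com/By-Xin/BuddyParallel | companion/app/buddy_parallel/services/telegram_bridge.py | _chunk_notice_text
-- ===== SOURCE A (Python) =====
-- def _chunk_notice_text(text: str, max_chars: int = 48) -> list[str]:
--     normalized = " ".join(text.split())
--     if not normalized:
--         return ["(>_<) beep beep"]
--
--     chunks: list[str] = []
--     current = ""
--     for word in normalized.split(" "):
--         while len(word) > max_chars:
--             if current:
--                 chunks.append(current)
--                 current = ""
--             chunks.append(word[:max_chars])
--             word = word[max_chars:]
--         candidate = word if not current else f"{current} {word}"
--         if len(candidate) <= max_chars: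
--             current = candidate
--         else:
--             if current:
--                 chunks.append(current)
--             current = word
--     if current:
--         chunks.append(current)
--     return chunks or ["(>_<) beep beep"]
-- ===== SOURCE B (Python) =====
-- def _chunk_notice_text(text: str, max_chars: int = 48) -> list[str]:
--     normalized = " ".join(text.split())
--     if not normalized:
--         return ["(>_<) beep beep"]
--
--     # Pass 1: flatten the words into tagged atoms; the hard pieces of an
--     # over-long word come from closed-form slicing, not a while loop.
--     atoms: list[tuple[str, bool]] = []
--     for word in normalized.split(" "):
--         k = (len(word) - 1) // max_chars  # number of hard (full-width) pieces
--         atoms.extend((word[i * max_chars:(i + 1) * max_chars], True) for i in range(k))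
--         atoms.append((word[k * max_chars:], False))
--
--     # Pass 2: one fold over the atoms; a single merged condition decides flushing.
--     chunks: list[str] = []
--     current = ""
--     for piece, hard in atoms:
--         sep = " " if current else ""
--         if hard or len(current) + len(sep) + len(piece) > max_chars:
--             if current:
--                 chunks.append(current)
--             if hard:
--                 chunks.append(piece)
--                 current = ""
--             else:
--                 current = piece
--         else:
--             current += sep + piece
--     if current:
--         chunks.append(current)
--     return chunks or ["(>_<) beep beep"]
-- ===== Notes on version B (the rewrite author's own statement) =====
-- stated objective: alternative
-- what changed: B replaces A's nested while-rechop inside the word loop by a first pass that flattens the words into a flat list of tagged atoms (hard pieces obtained by closed-form slicing with k=(len(word)-1)//max_chars, soft tails) and a second single fold over the atoms that emits the chunks.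
import Mathlib
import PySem

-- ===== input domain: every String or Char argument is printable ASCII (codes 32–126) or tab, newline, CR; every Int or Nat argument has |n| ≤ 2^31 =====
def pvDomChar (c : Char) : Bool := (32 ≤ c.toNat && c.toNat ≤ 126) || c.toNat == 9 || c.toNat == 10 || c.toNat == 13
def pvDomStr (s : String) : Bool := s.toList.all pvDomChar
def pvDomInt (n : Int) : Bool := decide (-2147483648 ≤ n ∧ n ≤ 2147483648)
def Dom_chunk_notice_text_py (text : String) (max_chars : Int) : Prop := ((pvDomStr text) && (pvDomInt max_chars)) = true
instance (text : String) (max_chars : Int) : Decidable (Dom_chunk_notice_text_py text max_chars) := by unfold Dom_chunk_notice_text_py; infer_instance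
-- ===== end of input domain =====

-- B replaces A's in-loop while-rechopping by a first pass that flattens the words into a
-- list of tagged atoms (hard pieces cut by closed-form slicing, soft tails) and a second
-- pass folding the atoms into chunks; objective: alternative decomposition, not speed.

-- ===== PORT A =====
-- the `while len(word) > max_chars` loop; fuel = initial word length, enough iterations
-- whenever max_chars ≥ 1 (for max_chars ≤ 0 the Python loop never terminates — outside Pre_)
def pvChopA (mc : Int) : Nat → List (List Char) → List Char → List Char → List (List Char) × List Char × List Char
  | 0, c, cur, w => (c, cur, w)
  | f + 1, c, cur, w =>
    if PySem.Chars.len w > mc then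
      let p := if cur ≠ [] then (c ++ [cur], ([] : List Char)) else (c, cur)
      pvChopA mc f (p.1 ++ [PySem.Chars.slice w none (some mc)]) p.2 (PySem.Chars.slice w (some mc) none)
    else (c, cur, w)

-- `candidate = word if not current else f"{current} {word}"` and the greedy pack
def pvSoftA (mc : Int) (c : List (List Char)) (cur w : List Char) : List (List Char) × List Char :=
  let cand := if cur = [] then w else cur ++ ' ' :: w
  if PySem.Chars.len cand ≤ mc then (c, cand)
  else ((if cur ≠ [] then c ++ [cur] else c), w)

def pvStepA (mc : Int) (s : List (List Char) × List Char) (w : List Char) : List (List Char) × List Char :=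
  let t := pvChopA mc w.length s.1 s.2 w
  pvSoftA mc t.1 t.2.1 t.2.2

def chunk_notice_text_py (text : String) (max_chars : Int) : List String :=
  let normalized := PySem.Chars.join [' '] (PySem.Chars.split₀ text.toList)
  if normalized = [] then ["(>_<) beep beep"]
  else
    let r := (PySem.Chars.splitOn normalized [' ']).foldl (pvStepA max_chars) ([], [])
    let chunks := if r.2 ≠ [] then r.1 ++ [r.2] else r.1
    if chunks = [] then ["(>_<) beep beep"] else chunks.map (fun cs => String.ofList cs)

-- ===== PORT B =====
-- tagged atoms of one word: k = (len(word)-1)//max_chars hard pieces, then the soft tail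
def pvAtoms (mc : Int) (w : List Char) : List (List Char × Bool) :=
  let k := PySem.Int.floordiv (PySem.Chars.len w - 1) mc
  (PySem.List.pyRange 0 k).map
      (fun i => (PySem.Chars.slice w (some (i * mc)) (some ((i + 1) * mc)), true))
    ++ [(PySem.Chars.slice w (some (k * mc)) none, false)]

def pvStepB (mc : Int) (s : List (List Char) × List Char) (a : List Char × Bool) : List (List Char) × List Char :=
  let sep : List Char := if s.2 = [] then [] else [' ']
  if a.2 || decide (PySem.Chars.len s.2 + PySem.Chars.len sep + PySem.Chars.len a.1 > mc) then
    let c1 := if s.2 ≠ [] then s.1 ++ [s.2] else s.1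
    if a.2 then (c1 ++ [a.1], ([] : List Char)) else (c1, a.1)
  else (s.1, s.2 ++ sep ++ a.1)

def chunk_notice_text_py_alt (text : String) (max_chars : Int) : List String :=
  let normalized := PySem.Chars.join [' '] (PySem.Chars.split₀ text.toList)
  if normalized = [] then ["(>_<) beep beep"]
  else
    let atoms := (PySem.Chars.splitOn normalized [' ']).foldl
      (fun acc w => acc ++ pvAtoms max_chars w) []
    let r := atoms.foldl (pvStepB max_chars) ([], [])
    let chunks := if r.2 ≠ [] then r.1 ++ [r.2] else r.1
    if chunks = [] then ["(>_<) beep beep"] else chunks.map (fun cs => String.ofList cs)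

-- ===== PRECONDITION & SPEC =====
-- Pre_ excludes max_chars ≤ 0 together with non-blank text: there A's inner while loop never
-- terminates (word[:max_chars] makes no progress), so A returns no value on those inputs.
def Pre_chunk_notice_text_py (text : String) (max_chars : Int) : Prop :=
  1 ≤ max_chars ∨ PySem.Chars.split₀ text.toList = []
instance (text : String) (max_chars : Int) : Decidable (Pre_chunk_notice_text_py text max_chars) := by unfold Pre_chunk_notice_text_py; infer_instance
def pvWitness_chunk_notice_text_py : String × Int := ("beep boop telegram bridge notice", 9)
def Spec_chunk_notice_text_py (text : String) (max_chars : Int) (out : List String) : Prop := out = chunk_notice_text_py_alt text max_chars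
instance (text : String) (max_chars : Int) (out : List String) : Decidable (Spec_chunk_notice_text_py text max_chars out) := by unfold Spec_chunk_notice_text_py; infer_instance

-- ===== CLAIM (what is proved, stated in full; the proofs are below) =====
def Claim_equal_chunk_notice_text_py : Prop := ∀ (text : String) (max_chars : Int), Dom_chunk_notice_text_py text max_chars → Pre_chunk_notice_text_py text max_chars → Spec_chunk_notice_text_py text max_chars (chunk_notice_text_py text max_chars)

-- ===== LEMMAS AND PROOFS =====

theorem pvRange_shift (a : Int) (K : Nat) :
    PySem.List.pyRange a (a + K) = (List.range K).map (fun i : Nat => a + (i : Int)) := by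
  induction K with
  | zero => simp [PySem.List.pyRange]
  | succ n ih =>
    rw [show (a + (↑(n + 1)) : Int) = (a + n) + 1 by push_cast; ring,
        PySem.List.pyRange_one_succ_right (by omega), ih, List.range_succ]
    simp

theorem pvSliceNN (w : List Char) (a b : Nat) :
    PySem.Chars.slice w (some ((a : Nat) : Int)) (some ((b : Nat) : Int)) = (w.drop a).take (b - a) := by
  rw [PySem.Chars.slice_eq_listSlice, PySem.List.slice_natCast]

-- a word that already fits contributes its single soft atom
theorem pvAtoms_small (mc : Int) (hmc : 1 ≤ mc) (w : List Char)
    (hw : ¬ PySem.Chars.len w > mc) : pvAtoms mc w = [(w, false)] := by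
  simp only [pvAtoms, PySem.Chars.len_eq]
  rw [PySem.Chars.len_eq] at hw
  rcases Nat.eq_zero_or_pos w.length with h0 | h1
  · have hw0 : w = [] := List.length_eq_zero_iff.mp h0
    subst hw0
    have hk : PySem.Int.floordiv (((([] : List Char).length : Int)) - 1) mc = -1 := by
      rw [PySem.Int.floordiv_eq_ediv_of_pos (by omega)]
      have h2 : ((([] : List Char).length : Int)) - 1 = (mc - 1) + (-1) * mc := by simp; ring
      rw [h2, Int.add_mul_ediv_right _ _ (by omega : mc ≠ 0),
          Int.ediv_eq_zero_of_lt (by omega) (by omega)]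
      omega
    rw [hk]
    rw [show PySem.List.pyRange 0 (-1) = [] by decide]
    simp [PySem.Chars.slice_eq_listSlice, PySem.List.slice]
  · have hk : PySem.Int.floordiv (((w.length : Int)) - 1) mc = 0 := by
      rw [PySem.Int.floordiv_eq_ediv_of_pos (by omega)]
      exact Int.ediv_eq_zero_of_lt (by omega) (by omega)
    rw [hk]
    rw [show PySem.List.pyRange 0 0 = [] by decide]
    rw [show ((0 : Int) * mc) = (((0 : Nat) : Nat) : Int) by simp,
        PySem.Chars.slice_eq_listSlice, PySem.List.slice_from _ (by simp)]
    simp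

-- an over-long word: first atom is the hard head, the rest are the atoms of the cut tail
theorem pvAtoms_step (mc : Int) (hmc : 1 ≤ mc) (w : List Char)
    (hw : PySem.Chars.len w > mc) :
    pvAtoms mc w
      = (PySem.Chars.slice w none (some mc), true)
          :: pvAtoms mc (PySem.Chars.slice w (some mc) none) := by
  set M := mc.toNat with hMdef
  have hmcM : mc = (M : Int) := by omega
  rw [PySem.Chars.len_eq] at hw
  have hMw : M < w.length := by omega
  have hd : PySem.Chars.slice w (some mc) none = w.drop M := by
    rw [PySem.Chars.slice_eq_listSlice, PySem.List.slice_from _ (by omega)]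
  have hdlen : ((w.drop M).length : Int) = (w.length : Int) - mc := by
    simp [List.length_drop]; omega
  set k := PySem.Int.floordiv ((w.length : Int) - 1) mc with hkdef
  have hkd : PySem.Int.floordiv (((w.drop M).length : Int) - 1) mc = k - 1 := by
    rw [hdlen,
        show (w.length : Int) - mc - 1 = ((w.length : Int) - 1) + (-1) * mc by ring,
        PySem.Int.floordiv_eq_ediv_of_pos (by omega),
        Int.add_mul_ediv_right _ _ (by omega : mc ≠ 0), hkdef,
        PySem.Int.floordiv_eq_ediv_of_pos (by omega)]
    ring
  have hk1 : 1 ≤ k := by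
    rw [hkdef]
    exact (PySem.Int.le_floordiv_iff_mul_le (by omega)).2 (by omega)
  obtain ⟨K, hK⟩ : ∃ K : Nat, k = 1 + (K : Int) := ⟨(k - 1).toNat, by omega⟩
  simp only [pvAtoms, PySem.Chars.len_eq, hd, hkd, ← hkdef]
  have hr1 : PySem.List.pyRange 0 k = (List.range (K + 1)).map (fun i : Nat => (i : Int)) := by
    rw [show k = 0 + ((K + 1 : Nat) : Int) by push_cast; omega, pvRange_shift]
    simp only [zero_add]
  have hr2 : PySem.List.pyRange 0 (k - 1) = (List.range K).map (fun i : Nat => (i : Int)) := by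
    rw [show k - 1 = 0 + ((K : Nat) : Int) by omega, pvRange_shift]
    simp only [zero_add]
  rw [hr1, hr2, List.range_succ_eq_map]
  simp only [List.map_cons, List.map_map, List.cons_append, Function.comp_def,
    Nat.succ_eq_add_one]
  congr 1
  · -- head atom = w[:mc]
    congr 1
    rw [show (((0 : Nat) : Int)) * mc = (((0 : Nat) : Nat) : Int) by simp,
        show ((((0 : Nat) : Int)) + 1) * mc = ((M : Nat) : Int) by rw [hmcM]; push_cast; ring,
        pvSliceNN, PySem.Chars.slice_eq_listSlice, PySem.List.slice_to _ (by omega)]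
    simp [hMdef]
  congr 1
  · -- middle hard pieces shift by one index
    apply List.map_congr_left
    intro i _
    congr 1
    rw [show ((((i + 1 : Nat)) : Int)) * mc = (((i + 1) * M : Nat) : Int) by
          rw [hmcM]; push_cast; ring,
        show ((((i + 1 : Nat)) : Int) + 1) * mc = (((i + 2) * M : Nat) : Int) by
          rw [hmcM]; push_cast; ring,
        show (((i : Nat)) : Int) * mc = ((i * M : Nat) : Int) by rw [hmcM]; push_cast; ring,
        show (((i : Nat) : Int) + 1) * mc = (((i + 1) * M : Nat) : Int) by
          rw [hmcM]; push_cast; ring,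
        pvSliceNN, pvSliceNN, List.drop_drop]
    rw [show (i + 2) * M - (i + 1) * M = M by
          rw [show (i + 2) * M = (i + 1) * M + M by ring]; omega,
        show (i + 1) * M - i * M = M by rw [show (i + 1) * M = i * M + M by ring]; omega,
        show M + i * M = (i + 1) * M by ring]
  · -- the tail atom
    congr 1
    rw [show k * mc = (((1 + K) * M : Nat) : Int) by rw [hK, hmcM]; push_cast; ring,
        show (k - 1) * mc = ((K * M : Nat) : Int) by rw [hK, hmcM]; push_cast; ring,
        PySem.Chars.slice_eq_listSlice, PySem.List.slice_from _ (by positivity),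
        PySem.Chars.slice_eq_listSlice, PySem.List.slice_from _ (by positivity),
        List.drop_drop]
    rw [Int.toNat_natCast, Int.toNat_natCast, show M + K * M = (1 + K) * M from by ring]

theorem pvStepB_soft (mc : Int) (s : List (List Char) × List Char) (w : List Char) :
    pvStepB mc s (w, false) = pvSoftA mc s.1 s.2 w := by
  unfold pvStepB pvSoftA
  by_cases hc : s.2 = [] <;> simp [hc, PySem.Chars.len_eq]
  by_cases hlen : (s.2.length : Int) + 1 + (w.length : Int) > mc
  · rw [if_pos (by omega), if_neg (by omega)]
  · rw [if_neg (by omega), if_pos (by omega)]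

theorem pvChopA_done (mc : Int) (w : List Char) (hw : ¬ PySem.Chars.len w > mc) :
    ∀ fuel c cur, pvChopA mc fuel c cur w = (c, cur, w) := by
  intro fuel c cur
  cases fuel with
  | zero => rfl
  | succ f =>
    simp only [pvChopA]
    rw [if_neg hw]

-- the key per-word lemma: folding B's atoms equals A's chop-then-pack step
theorem pvKey (mc : Int) (hmc : 1 ≤ mc) :
    ∀ fuel (w : List Char) (s : List (List Char) × List Char), w.length ≤ fuel →
      List.foldl (pvStepB mc) s (pvAtoms mc w)
        = (fun t => pvSoftA mc t.1 t.2.1 t.2.2) (pvChopA mc fuel s.1 s.2 w) := by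
  intro fuel
  induction fuel with
  | zero =>
    intro w s hlen
    have hw0 : w = [] := by
      cases w with
      | nil => rfl
      | cons a l => simp at hlen
    subst hw0
    have hno : ¬ PySem.Chars.len ([] : List Char) > mc := by
      rw [PySem.Chars.len_eq]; simp; omega
    rw [pvAtoms_small mc hmc _ hno, pvChopA_done mc _ hno]
    simp [pvStepB_soft]
  | succ f ih =>
    intro w s hlen
    by_cases h : PySem.Chars.len w > mc
    · rw [pvAtoms_step mc hmc w h, List.foldl_cons]
      have hstep : pvChopA mc (f + 1) s.1 s.2 w
          = pvChopA mc f
              ((if s.2 ≠ [] then s.1 ++ [s.2] else s.1) ++ [PySem.Chars.slice w none (some mc)])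
              [] (PySem.Chars.slice w (some mc) none) := by
        rw [pvChopA]
        simp only [h, if_pos]
        by_cases hc : s.2 = [] <;> simp [hc]
      rw [hstep]
      have hB : pvStepB mc s (PySem.Chars.slice w none (some mc), true)
          = ((if s.2 ≠ [] then s.1 ++ [s.2] else s.1) ++ [PySem.Chars.slice w none (some mc)],
             ([] : List Char)) := by
        unfold pvStepB
        simp
      rw [hB]
      have hd : PySem.Chars.slice w (some mc) none = w.drop mc.toNat := by
        rw [PySem.Chars.slice_eq_listSlice, PySem.List.slice_from _ (by omega)]
      have hlen' : (PySem.Chars.slice w (some mc) none).length ≤ f := by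
        rw [hd, List.length_drop]
        rw [PySem.Chars.len_eq] at h
        omega
      exact ih _ _ hlen'
    · rw [pvAtoms_small mc hmc w h, pvChopA_done mc w h]
      simp [pvStepB_soft]

theorem pvFold (mc : Int) (hmc : 1 ≤ mc) :
    ∀ (ws : List (List Char)) (s : List (List Char) × List Char),
      List.foldl (pvStepB mc) s (ws.flatMap (pvAtoms mc)) = List.foldl (pvStepA mc) s ws := by
  intro ws
  induction ws with
  | nil => intro s; simp
  | cons w rest ih =>
    intro s
    rw [List.flatMap_cons, List.foldl_append, ih, List.foldl_cons]
    congr 1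
    exact pvKey mc hmc w.length w s (le_refl _)

-- ===== VERDICT (by name: the statement is the Claim_ definition above) =====
theorem chunk_notice_text_py_spec : Claim_equal_chunk_notice_text_py := by
  intro text max_chars _hdom hpre
  unfold Spec_chunk_notice_text_py chunk_notice_text_py chunk_notice_text_py_alt
  by_cases hN : PySem.Chars.join [' '] (PySem.Chars.split₀ text.toList) = []
  · simp [hN]
  · have hmc : 1 ≤ max_chars := by
      rcases hpre with h | h
      · exact h
      · exact absurd (by rw [h, PySem.Chars.join_nil]) hN
    simp only [hN, if_false]
    rw [show (List.foldl (fun acc w => acc ++ pvAtoms max_chars w) []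
          (PySem.Chars.splitOn (PySem.Chars.join [' '] (PySem.Chars.split₀ text.toList)) [' ']))
        = List.flatMap (pvAtoms max_chars)
          (PySem.Chars.splitOn (PySem.Chars.join [' '] (PySem.Chars.split₀ text.toList)) [' '])
      from by rw [PySem.List.foldl_append_eq_flatMap]; simp]
    rw [pvFold max_chars hmc]
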